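-- pv_equiv track=rewrite | github.com/eslywadan/dataservice | tools/request_handler.py | validate_ds_permission
-- ===== SOURCE A (Python) =====
-- def validate_ds_permission(registry, url):
--
--     nde =url.partition("/ds")[2]
--     permit = []
--     if len(registry.strip())==0:  return "No Permit"
--     for reg in registry.split(","):
--         if reg.startswith("-") and nde.startswith(reg.partition("-")[2]):
--             # Negative element, match pattern is not allowed
--             permit.append(False)
--
--         if not reg.startswith("-") and nde.startswith(reg):
--             permit.append(True)
--
--     if permit.__contains__(False) or permit.__len__() == 0:
--         return "No Permit"
--     else:
--         return "Permit"
-- ===== SOURCE B (Python) =====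
-- def validate_ds_permission(registry, url):
--     nde = url.partition("/ds")[2]
--     if not registry.strip():
--         return "No Permit"
--     allows, denies = set(), set()
--     for e in registry.split(","):
--         if e.startswith("-"):
--             denies.add(e[1:])
--         else:
--             allows.add(e)
--     has_pos = has_neg = False
--     for k in range(len(nde) + 1):
--         p = nde[:k]
--         if p in allows:
--             has_pos = True
--         if p in denies:
--             has_neg = True
--     return "Permit" if has_pos and not has_neg else "No Permit"
-- ===== Notes on version B (the rewrite author's own statement) =====
-- stated objective: alternative
-- what changed: Inverts the matching direction: instead of scanning registry entries and prefix-testing each against the URL suffix while appending booleans to one mixed list, B builds allow/deny hash sets once and then enumerates the prefixes of the URL suffix, deciding by set membership (has_pos and not has_neg).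
import Mathlib
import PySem

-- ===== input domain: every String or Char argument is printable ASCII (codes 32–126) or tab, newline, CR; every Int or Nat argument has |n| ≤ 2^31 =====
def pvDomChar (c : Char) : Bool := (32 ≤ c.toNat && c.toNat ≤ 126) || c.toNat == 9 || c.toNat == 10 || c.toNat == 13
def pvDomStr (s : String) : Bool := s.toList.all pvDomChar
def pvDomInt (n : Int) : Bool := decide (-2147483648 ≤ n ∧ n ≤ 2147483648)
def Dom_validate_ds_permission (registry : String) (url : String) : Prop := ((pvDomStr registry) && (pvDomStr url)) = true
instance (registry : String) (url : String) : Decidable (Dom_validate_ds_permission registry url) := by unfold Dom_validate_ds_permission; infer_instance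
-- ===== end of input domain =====

-- B inverts the matching direction: allow/deny sets built once, then the prefixes of
-- the URL suffix are looked up by set membership instead of prefix-testing each entry.


-- ===== PORT A =====
-- s.partition(sep)[2] for nonempty sep, ported by hand (PySem has no partition):
-- the first occurrence via PySem.Chars.find (-1 = absent → third component is "");
-- exact for nonempty sep, which is how both programs call it.
def pvPartAfter (s sep : List Char) : List Char :=
  let i := PySem.Chars.find s sep
  if i = -1 then [] else s.drop (i.toNat + sep.length)

def validate_ds_permission (registry : String) (url : String) : String :=
  let nde := pvPartAfter url.toList ['/', 'd', 's']
  if (PySem.Chars.strip registry.toList).length = 0 then "No Permit"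
  else
    let permit := (PySem.Chars.splitOn registry.toList [',']).foldl (fun acc reg =>
      let acc1 := if PySem.Chars.startswith reg ['-'] &&
                     PySem.Chars.startswith nde (pvPartAfter reg ['-']) then acc ++ [false] else acc
      if !PySem.Chars.startswith reg ['-'] && PySem.Chars.startswith nde reg then
        acc1 ++ [true] else acc1) []
    if permit.contains false || permit.length = 0 then "No Permit" else "Permit"

-- ===== PORT B =====
def validate_ds_permission_alt (registry : String) (url : String) : String :=
  let nde := pvPartAfter url.toList ['/', 'd', 's']
  if (PySem.Chars.strip registry.toList).length = 0 then "No Permit"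
  else
    let sets := (PySem.Chars.splitOn registry.toList [',']).foldl
      (fun (p : PySem.Set (List Char) × PySem.Set (List Char)) e =>
        if PySem.Chars.startswith e ['-'] then (p.1, PySem.Set.add p.2 (e.drop 1))
        else (PySem.Set.add p.1 e, p.2)) (PySem.Set.empty, PySem.Set.empty)
    -- nde[:k] for k ∈ range(len(nde)+1): k ≥ 0, so the slice is exactly List.take k.toNat
    let flags := (PySem.List.pyRange 0 ((nde.length : Int) + 1) 1).foldl
      (fun (b : Bool × Bool) k =>
        (if PySem.Set.contains sets.1 (nde.take k.toNat) then true else b.1,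
         if PySem.Set.contains sets.2 (nde.take k.toNat) then true else b.2)) (false, false)
    if flags.1 && !flags.2 then "Permit" else "No Permit"

-- ===== PRECONDITION & SPEC =====
def Spec_validate_ds_permission (registry : String) (url : String) (out : String) : Prop := out = validate_ds_permission_alt registry url
instance (registry : String) (url : String) (out : String) : Decidable (Spec_validate_ds_permission registry url out) := by unfold Spec_validate_ds_permission; infer_instance

-- ===== CLAIM (what is proved, stated in full; the proofs are below) =====
def Claim_equal_validate_ds_permission : Prop := ∀ (registry : String) (url : String), Dom_validate_ds_permission registry url → Spec_validate_ds_permission registry url (validate_ds_permission registry url)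

-- ===== LEMMAS AND PROOFS =====

-- negative-entry match / positive-entry match, A's two conditions
def pvNegM (nde e : List Char) : Bool :=
  PySem.Chars.startswith e ['-'] && PySem.Chars.startswith nde (pvPartAfter e ['-'])
def pvPosM (nde e : List Char) : Bool :=
  !PySem.Chars.startswith e ['-'] && PySem.Chars.startswith nde e
def pvG (nde e : List Char) : List Bool :=
  (if pvNegM nde e then [false] else []) ++ (if pvPosM nde e then [true] else [])

lemma pv_fold_eq (nde : List Char) :
    ∀ (es : List (List Char)) (acc : List Bool),
    es.foldl (fun acc reg =>
      let acc1 := if PySem.Chars.startswith reg ['-'] &&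
                     PySem.Chars.startswith nde (pvPartAfter reg ['-']) then acc ++ [false] else acc
      if !PySem.Chars.startswith reg ['-'] && PySem.Chars.startswith nde reg then
        acc1 ++ [true] else acc1) acc
    = acc ++ es.flatMap (pvG nde) := by
  intro es
  induction es with
  | nil => intro acc; simp
  | cons e t ih =>
      intro acc
      simp only [List.foldl_cons, List.flatMap_cons, ih, pvG, pvNegM, pvPosM]
      split_ifs <;> simp_all

lemma pv_flat_contains (nde : List Char) (es : List (List Char)) :
    ((es.flatMap (pvG nde)).contains false) = es.any (pvNegM nde) := by
  induction es with
  | nil => simp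
  | cons e t ih =>
      simp only [List.flatMap_cons, List.any_cons, List.contains_append, ih, pvG]
      split_ifs <;> simp_all

lemma pv_flat_nil (nde : List Char) (es : List (List Char)) :
    ((es.flatMap (pvG nde)) = []) ↔ (es.any (pvNegM nde) = false ∧ es.any (pvPosM nde) = false) := by
  induction es with
  | nil => simp
  | cons e t ih =>
      simp only [List.flatMap_cons, List.any_cons, List.append_eq_nil_iff, ih, pvG]
      split_ifs <;> simp_all

-- if e starts with '-', A's reg.partition("-")[2] is exactly B's e[1:]
lemma pv_partAfter_dash (e : List Char) (h : PySem.Chars.startswith e ['-'] = true) :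
    pvPartAfter e ['-'] = e.drop 1 := by
  have hp : ['-'] <+: e := (PySem.Chars.startswith_iff e ['-']).mp h
  have hnn : 0 ≤ PySem.Chars.find e ['-'] :=
    (PySem.Chars.find_nonneg_iff e ['-']).mpr hp.isInfix
  have hspec := PySem.Chars.find_spec hnn
  have h0 : (PySem.Chars.find e ['-']).toNat = 0 := by
    by_contra hne
    exact hspec.2 0 (Nat.pos_of_ne_zero hne) (by simpa using hp)
  unfold pvPartAfter
  have : PySem.Chars.find e ['-'] ≠ -1 := by omega
  simp [this, h0]

-- the B fold with two independent set accumulators is two folds (specific to B's step)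
lemma pv_sets_split (es : List (List Char)) :
    ∀ (a b : PySem.Set (List Char)),
    es.foldl (fun (p : PySem.Set (List Char) × PySem.Set (List Char)) e =>
        if PySem.Chars.startswith e ['-'] then (p.1, PySem.Set.add p.2 (e.drop 1))
        else (PySem.Set.add p.1 e, p.2)) (a, b)
    = (es.foldl (fun s e => if PySem.Chars.startswith e ['-'] then s else PySem.Set.add s e) a,
       es.foldl (fun s e => if PySem.Chars.startswith e ['-'] then PySem.Set.add s (e.drop 1) else s) b) := by
  induction es with
  | nil => intro a b; rfl
  | cons e t ih =>
      intro a b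
      rcases h : PySem.Chars.startswith e ['-'] <;>
        simp only [List.foldl_cons, h, reduceIte] <;> exact ih _ _

-- the B fold with two independent flag accumulators is two folds (specific to B's step)
lemma pv_flags_split (S T : PySem.Set (List Char)) (nde : List Char) (l : List Int) :
    ∀ (x y : Bool),
    l.foldl (fun (b : Bool × Bool) k =>
        (if PySem.Set.contains S (nde.take k.toNat) then true else b.1,
         if PySem.Set.contains T (nde.take k.toNat) then true else b.2)) (x, y)
    = (l.foldl (fun b k => if PySem.Set.contains S (nde.take k.toNat) then true else b) x,
       l.foldl (fun b k => if PySem.Set.contains T (nde.take k.toNat) then true else b) y) := by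
  induction l with
  | nil => intro x y; rfl
  | cons k t ih =>
      intro x y
      simp only [List.foldl_cons, ih]

-- B's allow-set fold skips deny entries: it is a fold of Set.add over the filtered list
lemma pv_allow_fold (es : List (List Char)) :
    ∀ (a : PySem.Set (List Char)),
    es.foldl (fun s e => if PySem.Chars.startswith e ['-'] then s else PySem.Set.add s e) a
    = (es.filter (fun e => !PySem.Chars.startswith e ['-'])).foldl PySem.Set.add a := by
  induction es with
  | nil => intro a; rfl
  | cons e t ih =>
      intro a
      rcases h : PySem.Chars.startswith e ['-'] <;>
        simp only [List.foldl_cons, List.filter_cons, h, Bool.not_false, Bool.not_true, reduceIte] <;>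
        exact ih _

-- B's deny-set fold keeps only deny entries, stripped of the dash
lemma pv_deny_fold (es : List (List Char)) :
    ∀ (b : PySem.Set (List Char)),
    es.foldl (fun s e => if PySem.Chars.startswith e ['-'] then PySem.Set.add s (e.drop 1) else s) b
    = ((es.filter (fun e => PySem.Chars.startswith e ['-'])).map (List.drop 1)).foldl PySem.Set.add b := by
  induction es with
  | nil => intro b; rfl
  | cons e t ih =>
      intro b
      rcases h : PySem.Chars.startswith e ['-'] <;>
        simp only [List.foldl_cons, List.filter_cons, List.map_cons, h, reduceIte] <;>
        exact ih _

-- B's prefix-enumeration membership test equals A's startswith scan over the list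
lemma pv_any_prefix (nde : List Char) (L : List (List Char)) :
    (PySem.List.pyRange 0 ((nde.length : Int) + 1) 1).any
      (fun k => PySem.Set.contains (PySem.Set.ofList L) (nde.take k.toNat))
    = L.any (fun a => PySem.Chars.startswith nde a) := by
  rcases hb : L.any (fun a => PySem.Chars.startswith nde a) with _ | _
  · rw [List.any_eq_false]
    intro k hk
    rw [List.any_eq_false] at hb
    simp only [Bool.not_eq_true, PySem.Set.contains_eq_listContains]
    rw [List.contains_eq_mem, decide_eq_false_iff_not]
    intro hmem
    have hmem' : nde.take k.toNat ∈ L := (PySem.Set.mem_ofList _ _).mp hmem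
    have := hb _ hmem'
    rw [PySem.Chars.startswith_iff] at this
    exact this (List.take_prefix _ _)
  · rw [List.any_eq_true] at hb
    obtain ⟨a, ha, hsw⟩ := hb
    rw [List.any_eq_true]
    have hpre : a <+: nde := (PySem.Chars.startswith_iff nde a).mp hsw
    refine ⟨(a.length : Int), ?_, ?_⟩
    · rw [PySem.List.mem_pyRange_one]
      have := hpre.length_le
      omega
    · simp only [Int.toNat_natCast, PySem.Set.contains_eq_listContains]
      rw [List.contains_eq_mem, decide_eq_true_iff]
      rw [(PySem.Set.mem_ofList _ _ : _ ∈ PySem.Set.ofList L ↔ _)]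
      rwa [List.prefix_iff_eq_take.mp hpre] at ha

-- ===== VERDICT (by name: the statement is the Claim_ definition above) =====
theorem validate_ds_permission_spec : Claim_equal_validate_ds_permission := by
  intro registry url _
  unfold Spec_validate_ds_permission validate_ds_permission validate_ds_permission_alt
  by_cases hs : (PySem.Chars.strip registry.toList).length = 0
  · simp [hs]
  · simp only [hs, if_false]
    set nde := pvPartAfter url.toList ['/', 'd', 's'] with hnde
    set es := PySem.Chars.splitOn registry.toList [','] with hes
    rw [pv_fold_eq nde es []]
    simp only [List.nil_append]
    -- B side: split the pair folds into components
    rw [pv_sets_split es PySem.Set.empty PySem.Set.empty]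
    rw [pv_flags_split]
    -- identify the two accumulated sets
    ·
        have hallow : es.foldl (fun s e => if PySem.Chars.startswith e ['-'] then s else PySem.Set.add s e)
            PySem.Set.empty = PySem.Set.ofList (es.filter (fun e => !PySem.Chars.startswith e ['-'])) := by
          rw [pv_allow_fold, PySem.Set.ofList_eq_foldl]; rfl
        have hdeny : es.foldl (fun s e => if PySem.Chars.startswith e ['-'] then PySem.Set.add s (e.drop 1) else s)
            PySem.Set.empty
            = PySem.Set.ofList ((es.filter (fun e => PySem.Chars.startswith e ['-'])).map (List.drop 1)) := by
          rw [pv_deny_fold, PySem.Set.ofList_eq_foldl]; rfl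
        rw [hallow, hdeny]
        rw [PySem.List.foldl_if_true_eq, PySem.List.foldl_if_true_eq]
        simp only [Bool.false_or]
        rw [pv_any_prefix, pv_any_prefix]
        have hposB : (es.filter (fun e => !PySem.Chars.startswith e ['-'])).any
            (fun a => PySem.Chars.startswith nde a) = es.any (pvPosM nde) := by
          rw [List.any_filter]; rfl
        have hnegB : ((es.filter (fun e => PySem.Chars.startswith e ['-'])).map (List.drop 1)).any
            (fun a => PySem.Chars.startswith nde a) = es.any (pvNegM nde) := by
          rw [List.any_map, List.any_filter]
          congr 1
          funext e
          by_cases hd : PySem.Chars.startswith e ['-'] = true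
          · simp [pvNegM, hd, Function.comp, pv_partAfter_dash e hd]
          · simp [pvNegM, hd, Function.comp]
        rw [hposB, hnegB]
        have hc : ((es.flatMap (pvG nde)).contains false) = es.any (pvNegM nde) :=
          pv_flat_contains nde es
        have hl : ((es.flatMap (pvG nde)).length = 0) ↔
            (es.any (pvNegM nde) = false ∧ es.any (pvPosM nde) = false) := by
          rw [List.length_eq_zero_iff]; exact pv_flat_nil nde es
        by_cases hneg : es.any (pvNegM nde) = true
        · simp only [hc, hneg, Bool.true_or]
          simp
        · replace hneg : es.any (pvNegM nde) = false := by simpa using hneg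
          by_cases hpos : es.any (pvPosM nde) = true
          · have hne : ¬ (List.flatMap (pvG nde) es).length = 0 := by
              rw [hl]; simp [hpos]
            simp only [hc, hneg, hpos, Bool.false_or]
            simp
            simpa using hne
          · replace hpos : es.any (pvPosM nde) = false := by simpa using hpos
            have h0 : (List.flatMap (pvG nde) es).length = 0 := hl.mpr ⟨hneg, hpos⟩
            simp only [hc, hneg, hpos, Bool.false_or]
            simp
            simpa using h0
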